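-- pv_equiv track=rewrite | github.com/giulianwiggins/Conjugacy-tables-with-fixed-margins | RectangularArraysWithFixedMargins.py | arrays
-- ===== SOURCE A (Python) =====
-- def topRow(rowsum, columns): #rowsum is an integer, columns is an array of integers
-- 	# This generator yields all the possible top rows of a matrix with first row summing to the integer rowsum, and j-th column summing to columns[j]
-- 	if len(columns) == 1:
-- 		yield [min(rowsum, columns[0])]
-- 	else:
-- 		for i in range(max(rowsum - sum(columns[1:]),0), min(rowsum, columns[0]) + 1): # For i to be in position [0,0] we must have: sum(columns[1:]) + i >= rowsum
-- 			for row in topRow(rowsum - i, columns[1:]):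
-- 				yield [i] + row
--
-- def arrays(rows, columns):
-- 	# This generator returns all 2D arrays of integers in which the i-th row sums to rows[i] and the j-th column sums to columns[j]
-- 	if sum(rows) != sum(columns):
-- 		return
-- 	if len(rows) == 1:
-- 		yield [columns]
-- 	else:
-- 		for top_row in topRow(rows[0], columns):
-- 			for array in arrays(rows[1:], [columns[i] - top_row[i] for i in range(len(columns))]):
-- 				yield [top_row] + array
-- ===== SOURCE B (Python) =====
-- def arrays(rows, columns):
--     # DFS that fills the matrix cell by cell with feasible bounds, threading the
--     # remaining column sums and accumulating completed rows (same lexicographic order as A).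
--     if sum(rows) != sum(columns):
--         return
--
--     def fill_cells(r, todo, newcols, row, rest, prefix):
--         # Fill the current row: r = remaining row sum, todo = untouched column sums,
--         # newcols = updated sums of columns already filled, row = values placed so far,
--         # rest = targets of the rows after this one, prefix = completed rows.
--         if len(todo) == 1:
--             if r <= todo[0]:
--                 yield from start_row(rest, newcols + [todo[0] - r], prefix + [row + [r]])
--             return
--         lo = max(r - sum(todo[1:]), 0)
--         hi = min(r, todo[0])
--         for v in range(lo, hi + 1):
--             yield from fill_cells(r - v, todo[1:], newcols + [todo[0] - v],
--                                   row + [v], rest, prefix)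
--
--     def start_row(rest, cols, prefix):
--         if len(rest) == 1:
--             yield prefix + [cols]
--         else:
--             yield from fill_cells(rest[0], cols, [], [], rest[1:], prefix)
--
--     yield from start_row(rows, columns, [])
-- ===== Notes on version B (the rewrite author's own statement) =====
-- stated objective: alternative
-- what changed: A enumerates whole candidate top rows with a separate topRow generator, rebuilds the column list with an indexed comprehension and filters bad rows via a sum re-check at each recursion level; B is a single accumulator-passing DFS that fills the matrix one cell at a time with feasible bounds (the last cell of a row is forced, so no filtering or re-summing is ever needed) and threads the updated column sums through the recursion.
import Mathlib
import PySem

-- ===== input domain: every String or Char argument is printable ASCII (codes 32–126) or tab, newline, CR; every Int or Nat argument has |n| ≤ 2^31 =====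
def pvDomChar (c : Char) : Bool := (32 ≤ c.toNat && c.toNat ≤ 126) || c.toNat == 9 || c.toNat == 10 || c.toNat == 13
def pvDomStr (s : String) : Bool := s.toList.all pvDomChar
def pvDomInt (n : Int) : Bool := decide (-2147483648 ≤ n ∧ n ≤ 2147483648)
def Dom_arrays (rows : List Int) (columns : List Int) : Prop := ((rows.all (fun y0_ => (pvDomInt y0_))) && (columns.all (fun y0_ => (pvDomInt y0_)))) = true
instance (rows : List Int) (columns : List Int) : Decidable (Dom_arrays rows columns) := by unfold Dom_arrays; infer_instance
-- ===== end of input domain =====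

-- B replaces A's topRow-generator + per-level sum-check filtering by one cell-at-a-time
-- accumulator-passing DFS; same return values (yielded in the same order) on Pre_arrays.

-- ===== PORT A =====
-- topRow(rowsum, columns): all possible top rows (Python generator, collected in order).
-- columns = [] makes Python raise IndexError at columns[0]; that input is excluded by Pre_arrays.
def topRow : Int → List Int → List (List Int)
  | _, [] => []          -- Python raises IndexError here (unreachable under Pre_arrays)
  | r, [c] => [[min r c]]
  | r, c :: rest =>
      (PySem.List.pyRange (max (r - rest.sum) 0) (min r c + 1) 1).flatMap
        (fun i => (topRow (r - i) rest).map (fun row => i :: row))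

-- arrays(rows, columns); rows = [] makes Python raise IndexError at rows[0] (excluded by Pre_arrays).
-- Index accesses columns[i]/top_row[i] in the comprehension are always in range (topRow rows
-- have the length of columns), so pyGetD with default 0 is exact here.
def arrays (rows : List Int) (columns : List Int) : List (List (List Int)) :=
  if rows.sum ≠ columns.sum then []
  else
    match rows with
    | [] => []           -- Python raises IndexError here (unreachable under Pre_arrays)
    | [_] => [[columns]]
    | r :: rest =>
        (topRow r columns).flatMap
          (fun top_row =>
            (arrays rest
              ((PySem.List.pyRange 0 (columns.length : Int) 1).map
                (fun i => PySem.List.pyGetD columns i 0 - PySem.List.pyGetD top_row i 0))).map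
              (fun array => top_row :: array))

-- ===== PORT B =====
-- fill_cells: fill the current row one cell at a time; r = remaining row sum, todo = untouched
-- column sums, newcols = updated sums of the columns already filled, row = values placed so far,
-- rest = targets of the later rows, pfx = completed rows.  todo = [] raises in Python
-- (IndexError at todo[0], unreachable under Pre_arrays).
mutual
def fillCells (r : Int) (todo : List Int) (newcols : List Int) (row : List Int)
    (rest : List Int) (pfx : List (List Int)) : List (List (List Int)) :=
  match todo with
  | [] => []             -- Python raises IndexError here (unreachable under Pre_arrays)
  | [c] =>
      if r ≤ c then startRow rest (newcols ++ [c - r]) (pfx ++ [row ++ [r]]) else []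
  | c :: todo' =>
      (PySem.List.pyRange (max (r - todo'.sum) 0) (min r c + 1) 1).flatMap
        (fun v => fillCells (r - v) todo' (newcols ++ [c - v]) (row ++ [v]) rest pfx)
termination_by (rest.length, todo.length + 1)

def startRow (rest : List Int) (cols : List Int) (pfx : List (List Int)) :
    List (List (List Int)) :=
  match rest with
  | [] => []             -- Python raises IndexError here (unreachable under Pre_arrays)
  | [_] => [pfx ++ [cols]]
  | r :: rest' => fillCells r cols [] [] rest' pfx
termination_by (rest.length, 0)
end

def arrays_alt (rows : List Int) (columns : List Int) : List (List (List Int)) :=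
  if rows.sum ≠ columns.sum then [] else startRow rows columns []

-- ===== PRECONDITION & SPEC =====
-- Pre_arrays excludes exactly the inputs on which Python A raises IndexError: equal margin sums
-- with rows = [] (rows[0] fails), or with several rows and columns = [] (columns[0] fails).
def Pre_arrays (rows : List Int) (columns : List Int) : Prop :=
  rows.sum = columns.sum → (rows ≠ [] ∧ (columns ≠ [] ∨ rows.length = 1))
instance (rows : List Int) (columns : List Int) : Decidable (Pre_arrays rows columns) := by
  unfold Pre_arrays; infer_instance

def pvWitness_arrays : List Int × List Int := ([1, 1], [1, 1])

def Spec_arrays (rows : List Int) (columns : List Int) (out : List (List (List Int))) : Prop :=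
  out = arrays_alt rows columns
instance (rows : List Int) (columns : List Int) (out : List (List (List Int))) :
    Decidable (Spec_arrays rows columns out) := by unfold Spec_arrays; infer_instance

-- ===== CLAIM (what is proved, stated in full; the proofs are below) =====
def Claim_equal_arrays : Prop := ∀ (rows : List Int) (columns : List Int),
  Dom_arrays rows columns → Pre_arrays rows columns →
  Spec_arrays rows columns (arrays rows columns)

-- ===== LEMMAS AND PROOFS =====

theorem pvFlatMap_congr {α β : Type} {l : List α} {f g : α → List β}
    (h : ∀ a ∈ l, f a = g a) : l.flatMap f = l.flatMap g := by
  induction l with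
  | nil => rfl
  | cons x xs ih =>
      simp only [List.flatMap_cons]
      rw [h x (by simp), ih (fun a ha => h a (by simp [ha]))]

theorem pvSum_zipWith_sub : ∀ (xs ys : List Int), ys.length = xs.length →
    (List.zipWith (· - ·) xs ys).sum = xs.sum - ys.sum := by
  intro xs
  induction xs with
  | nil => intro ys h; simp at h; simp [h]
  | cons x xs ih =>
      intro ys h
      cases ys with
      | nil => simp at h
      | cons y ys =>
          simp only [List.zipWith_cons_cons, List.sum_cons]
          rw [ih ys (by simpa using h)]
          ring

theorem pvTopRow_length : ∀ (cols : List Int) (r : Int) (t : List Int),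
    t ∈ topRow r cols → t.length = cols.length := by
  intro cols
  induction cols with
  | nil => intro r t ht; simp [topRow] at ht
  | cons c rest ih =>
      intro r t ht
      cases rest with
      | nil =>
          simp only [topRow, List.mem_singleton] at ht
          simp [ht]
      | cons c' rest' =>
          simp only [topRow, List.mem_flatMap, List.mem_map] at ht
          obtain ⟨v, _, t', ht', rfl⟩ := ht
          simp [ih _ _ ht']

-- A's indexed comprehension over columns equals a zipWith when the lengths agree.
theorem pvGetD_range_sub : ∀ (xs ys : List Int), ys.length = xs.length →
    (List.range xs.length).map (fun k => xs.getD k 0 - ys.getD k 0) =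
      List.zipWith (· - ·) xs ys := by
  intro xs
  induction xs with
  | nil => intro ys h; simp
  | cons x xs ih =>
      intro ys h
      cases ys with
      | nil => simp at h
      | cons y ys =>
          rw [List.length_cons, List.range_succ_eq_map, List.map_cons, List.map_map]
          simp only [Function.comp_def, List.getD_cons_zero, List.getD_cons_succ,
            List.zipWith_cons_cons]
          rw [ih ys (by simpa using h)]

theorem pvRangeSub (xs ys : List Int) (h : ys.length = xs.length) :
    (PySem.List.pyRange 0 (xs.length : Int) 1).map
        (fun i => PySem.List.pyGetD xs i 0 - PySem.List.pyGetD ys i 0) =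
      List.zipWith (· - ·) xs ys := by
  rw [PySem.List.pyRange_one]
  simp only [sub_zero, Int.toNat_natCast, List.map_map]
  rw [← pvGetD_range_sub xs ys h]
  apply List.map_congr_left
  intro k _
  simp [PySem.List.pyGetD_natCast]

theorem pvFillCells_eq : ∀ (todo : List Int), todo ≠ [] →
    ∀ (r : Int) (newcols row rest : List Int) (pfx : List (List Int)),
    fillCells r todo newcols row rest pfx =
      (topRow r todo).flatMap
        (fun t => if t.sum = r then
            startRow rest (newcols ++ List.zipWith (· - ·) todo t) (pfx ++ [row ++ t])
          else []) := by
  intro todo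
  induction todo with
  | nil => intro h; exact absurd rfl h
  | cons c todo' ih =>
      intro _ r newcols row rest pfx
      cases todo' with
      | nil =>
          by_cases h : r ≤ c
          · simp [topRow, fillCells, h]
          · have hcr : ¬ (c = r) := by omega
            simp [topRow, fillCells, min_eq_right (by omega : c ≤ r), h, hcr]
      | cons c'' todo'' =>
          simp only [fillCells, topRow]
          rw [List.flatMap_assoc]
          apply pvFlatMap_congr
          intro v _
          rw [ih (by simp) (r - v) (newcols ++ [c - v]) (row ++ [v]) rest pfx,
            List.flatMap_map]
          apply pvFlatMap_congr
          intro t _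
          have hiff : ((v :: t).sum = r) ↔ (t.sum = r - v) := by
            simp only [List.sum_cons]; omega
          rw [if_congr hiff rfl rfl]
          simp [List.append_assoc]

theorem pvStartRow_eq : ∀ (rows cols : List Int) (pfx : List (List Int)),
    rows ≠ [] → cols ≠ [] → rows.sum = cols.sum →
    startRow rows cols pfx = (arrays rows cols).map (fun m => pfx ++ m) := by
  intro rows
  induction rows with
  | nil => intro cols pfx h; exact absurd rfl h
  | cons a rest ih =>
      intro cols pfx _ hc hs
      cases rest with
      | nil =>
          have ha : a = cols.sum := by simpa using hs
          simp [startRow, arrays, ha]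
      | cons b rest'' =>
          simp only [startRow]
          rw [pvFillCells_eq cols hc a [] [] (b :: rest'') pfx]
          have harr : arrays (a :: b :: rest'') cols =
              (topRow a cols).flatMap
                (fun top_row =>
                  (arrays (b :: rest'')
                    ((PySem.List.pyRange 0 (cols.length : Int) 1).map
                      (fun i => PySem.List.pyGetD cols i 0 - PySem.List.pyGetD top_row i 0))).map
                    (fun array => top_row :: array)) := by
            rw [arrays.eq_def, if_neg (by omega)]
          rw [harr, List.map_flatMap]
          apply pvFlatMap_congr
          intro t ht
          have hlen : t.length = cols.length := pvTopRow_length cols a t ht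
          rw [pvRangeSub cols t hlen]
          by_cases hts : t.sum = a
          · rw [if_pos hts]
            simp only [List.nil_append]
            have hzne : List.zipWith (· - ·) cols t ≠ [] := by
              cases cols with
              | nil => exact absurd rfl hc
              | cons x xs =>
                  cases t with
                  | nil => simp at hlen
                  | cons y ys => simp
            have hzsum : (b :: rest'').sum = (List.zipWith (· - ·) cols t).sum := by
              rw [pvSum_zipWith_sub cols t hlen, hts]
              simp only [List.sum_cons] at hs ⊢
              omega
            rw [ih (List.zipWith (· - ·) cols t) (pfx ++ [t]) (by simp) hzne hzsum,
              List.map_map]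
            apply List.map_congr_left
            intro m _
            simp
          · rw [if_neg hts]
            have : arrays (b :: rest'') (List.zipWith (· - ·) cols t) = [] := by
              rw [arrays.eq_def, if_pos]
              rw [pvSum_zipWith_sub cols t hlen]
              simp only [List.sum_cons] at hs ⊢
              omega
            simp [this]

-- ===== VERDICT (by name: the statement is the Claim_ definition above) =====
theorem arrays_spec : Claim_equal_arrays := by
  unfold Claim_equal_arrays Spec_arrays
  intro rows cols _ hpre
  by_cases hs : rows.sum = cols.sum
  · obtain ⟨hr, hcase⟩ := hpre hs
    unfold arrays_alt
    rw [if_neg (by omega)]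
    cases rows with
    | nil => exact absurd rfl hr
    | cons a rest =>
        cases rest with
        | nil =>
            have ha : a = cols.sum := by simpa using hs
            simp [startRow, arrays, ha]
        | cons b rest'' =>
            have hc : cols ≠ [] := by
              rcases hcase with h | h
              · exact h
              · simp at h
            rw [pvStartRow_eq (a :: b :: rest'') cols [] (by simp) hc hs]
            simp
  · rw [arrays.eq_def, arrays_alt, if_pos (by omega), if_pos (by omega)]
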